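-- pv_equiv track=rewrite | github.com/asdadfad/world-cup-draw | group_draw.py | is_group_valid
-- ===== SOURCE A (Python) =====
-- from collections import Counter
--
-- def is_group_valid(continents):
--     tab = Counter(continents)
--     if 'Eu' not in tab:
--         return False
--     if tab['Eu'] > 2:
--         return False
--     for cont, count in tab.items():
--         if cont != 'Eu' and count > 1:
--             return False
--     return True
-- ===== SOURCE B (Python) =====
-- def is_group_valid(continents):
--     eu = 0
--     seen = set()
--     for c in continents:
--         if c == 'Eu':
--             eu += 1
--             if eu > 2:
--                 return False
--         else:
--             if c in seen:
--                 return False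
--             seen.add(c)
--     return eu >= 1
-- ===== Notes on version B (the rewrite author's own statement) =====
-- stated objective: alternative
-- what changed: Replaces A's build-a-Counter-then-run-staged-checks design by a single streaming pass that tracks an Eu counter and a seen-set of non-Eu continents and returns False early at the first violation.
import Mathlib
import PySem

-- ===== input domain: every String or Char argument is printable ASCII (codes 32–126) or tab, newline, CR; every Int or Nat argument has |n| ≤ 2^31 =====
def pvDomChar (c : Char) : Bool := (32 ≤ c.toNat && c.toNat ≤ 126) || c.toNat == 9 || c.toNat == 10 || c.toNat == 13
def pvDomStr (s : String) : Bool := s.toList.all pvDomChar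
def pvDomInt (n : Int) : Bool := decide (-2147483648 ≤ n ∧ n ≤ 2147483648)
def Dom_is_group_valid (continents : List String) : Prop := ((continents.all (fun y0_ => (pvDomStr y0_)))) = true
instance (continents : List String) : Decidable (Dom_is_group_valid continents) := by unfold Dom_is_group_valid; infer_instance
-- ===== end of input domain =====

-- B replaces A's build-a-Counter-then-staged-checks design by a single streaming
-- pass (Eu counter + seen-set of non-Eu continents, early exit); alternative, same O(n).


-- ===== PORT A =====
def is_group_valid (continents : List String) : Bool :=
  let tab := PySem.Dict.counter continents
  if !(tab.contains "Eu") then false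
  else if tab.getD "Eu" 0 > 2 then false
  else tab.items.all (fun p => !(p.1 != "Eu" && p.2 > 1))

-- ===== PORT B =====
-- the for-loop of Source B, with its state (eu, seen) as accumulators and early exit
def pvGoB : List String → Nat → PySem.Set String → Bool
  | [], eu, _ => decide (eu ≥ 1)
  | c :: rest, eu, seen =>
    if c == "Eu" then
      if eu + 1 > 2 then false else pvGoB rest (eu + 1) seen
    else if PySem.Set.contains seen c then false
    else pvGoB rest eu (PySem.Set.add seen c)

def is_group_valid_alt (continents : List String) : Bool :=
  pvGoB continents 0 PySem.Set.empty

-- ===== PRECONDITION & SPEC =====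
def Spec_is_group_valid (continents : List String) (out : Bool) : Prop := out = is_group_valid_alt continents
instance (continents : List String) (out : Bool) : Decidable (Spec_is_group_valid continents out) := by unfold Spec_is_group_valid; infer_instance

-- ===== CLAIM (what is proved, stated in full; the proofs are below) =====
def Claim_equal_is_group_valid : Prop := ∀ (continents : List String), Dom_is_group_valid continents → Spec_is_group_valid continents (is_group_valid continents)

-- ===== LEMMAS AND PROOFS =====

-- invariant characterisation of B's loop
theorem pvGoB_eq (rest : List String) : ∀ (eu : Nat) (seen : PySem.Set String), eu ≤ 2 →
    (pvGoB rest eu seen = true ↔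
      (1 ≤ eu + rest.count "Eu" ∧ eu + rest.count "Eu" ≤ 2 ∧
        ∀ k, k ≠ "Eu" → rest.count k + (if k ∈ seen then 1 else 0) ≤ 1)) := by
  induction rest with
  | nil =>
    intro eu seen heu
    simp [pvGoB]
    intro h1
    constructor
    · omega
    · intro k _; split <;> omega
  | cons c rest ih =>
    intro eu seen heu
    by_cases hc : c = "Eu"
    · subst hc
      simp only [pvGoB, BEq.rfl, if_true]
      by_cases h3 : eu + 1 > 2
      · simp only [h3, if_true]
        constructor
        · intro h; exact absurd h (by simp)
        · rintro ⟨_, h2, _⟩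
          simp at h2
          omega
      · simp only [h3, if_false]
        rw [ih (eu + 1) seen (by omega)]
        constructor
        · rintro ⟨h1, h2, h4⟩
          refine ⟨by simp; omega, by simp; omega, ?_⟩
          intro k hk
          have hek : ¬("Eu" = k) := fun h => hk h.symm
          have := h4 k hk
          rw [List.count_cons]
          simpa [hk, hek] using this
        · rintro ⟨h1, h2, h4⟩
          refine ⟨by simp at h1 ⊢; omega,
                  by simp at h2 ⊢; omega, ?_⟩
          intro k hk
          have hek : ¬("Eu" = k) := fun h => hk h.symm
          have := h4 k hk
          rw [List.count_cons] at this
          simpa [hk, hek] using this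
    · have hcb : (c == "Eu") = false := by simpa using hc
      simp only [pvGoB, hcb, Bool.false_eq_true, if_false]
      by_cases hs : c ∈ seen
      · have : PySem.Set.contains seen c = true := by
          simpa [PySem.Set.contains] using hs
        simp only [this, if_true]
        constructor
        · intro h; exact absurd h (by simp)
        · rintro ⟨_, _, h4⟩
          have := h4 c hc
          simp [hs] at this
      · have : PySem.Set.contains seen c = false := by
          simpa [PySem.Set.contains] using hs
        simp only [this, Bool.false_eq_true, if_false]
        rw [ih eu (PySem.Set.add seen c) heu]
        have hcount : (c :: rest).count "Eu" = rest.count "Eu" := by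
          simp [hc]
        rw [hcount]
        constructor
        · rintro ⟨h1, h2, h4⟩
          refine ⟨h1, h2, ?_⟩
          intro k hk
          have := h4 k hk
          simp only [PySem.Set.mem_add] at this
          by_cases hkc : k = c
          · subst hkc
            rw [List.count_cons]
            simp [hs] at this ⊢
            omega
          · have hck : ¬(c = k) := fun h => hkc h.symm
            have hcc : List.count k (c :: rest) = List.count k rest := by
              simp [hck]
            rw [hcc]
            simpa [hkc] using this
        · rintro ⟨h1, h2, h4⟩
          refine ⟨h1, h2, ?_⟩
          intro k hk
          have := h4 k hk
          simp only [PySem.Set.mem_add]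
          by_cases hkc : k = c
          · subst hkc
            rw [List.count_cons] at this
            simp [hs] at this ⊢
            omega
          · have hck : ¬(c = k) := fun h => hkc h.symm
            have hcc : List.count k (c :: rest) = List.count k rest := by
              simp [hck]
            rw [hcc] at this
            simpa [hkc] using this

-- characterisation of A
theorem pvA_eq (xs : List String) :
    (is_group_valid xs = true ↔
      (1 ≤ xs.count "Eu" ∧ xs.count "Eu" ≤ 2 ∧
        ∀ k, k ≠ "Eu" → xs.count k ≤ 1)) := by
  unfold is_group_valid
  simp only [PySem.Dict.contains_counter, PySem.Dict.getD_counter, PySem.Dict.items_counter]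
  by_cases hmem : "Eu" ∈ xs
  · have hc : xs.contains "Eu" = true := by simpa using hmem
    have hpos : 1 ≤ xs.count "Eu" := List.count_pos_iff.2 hmem
    by_cases hgt : (xs.count "Eu" : Int) > 2
    · have : ¬ xs.count "Eu" ≤ 2 := by exact_mod_cast by omega
      simp [hgt]
      omega
    · have hle : xs.count "Eu" ≤ 2 := by exact_mod_cast by omega
      simp only [hc, Bool.not_true, Bool.false_eq_true, if_false, hgt, if_false]
      rw [List.all_eq_true]
      constructor
      · intro h
        refine ⟨hpos, hle, ?_⟩
        intro k hk
        by_cases hkx : k ∈ xs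
        · have := h (k, (xs.count k : Int))
            (by exact List.mem_map.2 ⟨k, (PySem.Set.mem_ofList _ _).2 hkx, rfl⟩)
          simp [hk] at this
          exact_mod_cast this
        · simp [List.count_eq_zero_of_not_mem hkx]
      · rintro ⟨_, _, h4⟩ p hp
        obtain ⟨k, _, rfl⟩ := List.mem_map.1 hp
        simp only [Bool.not_eq_true', Bool.and_eq_false_iff]
        by_cases hk : k = "Eu"
        · left; simp [hk]
        · right
          have := h4 k hk
          simp only [decide_eq_false_iff_not, not_lt]
          exact_mod_cast this
  · have hc : xs.contains "Eu" = false := by simpa using hmem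
    have h0 : xs.count "Eu" = 0 := List.count_eq_zero_of_not_mem hmem
    simp [h0]
    intro h; exact absurd h hmem

-- ===== VERDICT (by name: the statement is the Claim_ definition above) =====
theorem is_group_valid_spec : Claim_equal_is_group_valid := by
  intro xs _
  unfold Spec_is_group_valid is_group_valid_alt
  rw [Bool.eq_iff_iff, pvA_eq xs, pvGoB_eq xs 0 PySem.Set.empty (by omega)]
  constructor
  · rintro ⟨h1, h2, h4⟩
    refine ⟨by omega, by omega, ?_⟩
    intro k hk
    have := h4 k hk
    simp [PySem.Set.empty]
    omega
  · rintro ⟨h1, h2, h4⟩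
    refine ⟨by omega, by omega, ?_⟩
    intro k hk
    have := h4 k hk
    simpa [PySem.Set.empty] using this
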